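-- pv_equiv track=rewrite | github.com/science-of-finetuning/diffing-toolkit | src/utils/graders/token_relevance_grader.py | _majority_vote_per_position
-- ===== SOURCE A (Python) =====
-- from typing import List, Tuple, Literal, Dict
-- from collections import Counter
--
-- Label = Literal["RELEVANT", "IRRELEVANT", "UNKNOWN"]
--
-- def _majority_vote_per_position(
--     permutation_labels: List[List[Label]],
-- ) -> List[Label]:
--     assert isinstance(permutation_labels, list) and len(permutation_labels) > 0
--     num_positions = len(permutation_labels[0])
--     for run in permutation_labels:
--         assert len(run) == num_positions
--     final: List[Label] = []
--     for pos in range(num_positions):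
--         counts = Counter(
--             run[pos] for run in permutation_labels if run[pos] != "UNKNOWN"
--         )
--         if len(counts) == 0:
--             final.append("UNKNOWN")
--             continue
--         most_common = counts.most_common()
--         if len(most_common) == 1 or most_common[0][1] > most_common[1][1]:
--             final.append(most_common[0][0])
--         else:
--             final.append("UNKNOWN")
--     return final
-- ===== SOURCE B (Python) =====
-- from typing import List
--
-- def _majority_vote_per_position(permutation_labels):
--     assert isinstance(permutation_labels, list) and len(permutation_labels) > 0
--     num_positions = len(permutation_labels[0])
--     for run in permutation_labels:
--         assert len(run) == num_positions
--     final = []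
--     for pos in range(num_positions):
--         # sort-then-scan: sort the column (UNKNOWN dropped), then walk maximal
--         # blocks of equal labels, keeping the longest block and a tie flag.
--         col = sorted(run[pos] for run in permutation_labels if run[pos] != "UNKNOWN")
--         if not col:
--             final.append("UNKNOWN")
--             continue
--         best_label = col[0]
--         best_len = 0
--         tie = False
--         i = 0
--         n = len(col)
--         while i < n:
--             j = i
--             while j < n and col[j] == col[i]:
--                 j += 1
--             run_len = j - i
--             if run_len > best_len:
--                 best_label, best_len, tie = col[i], run_len, False
--             elif run_len == best_len:
--                 tie = True
--             i = j
--         final.append("UNKNOWN" if tie else best_label)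
--     return final
-- ===== Notes on version B (the rewrite author's own statement) =====
-- stated objective: alternative
-- what changed: B never builds a count table: instead of A's per-position Counter plus most_common() descending sort, B sorts each column (UNKNOWN dropped) and scans the maximal blocks of equal labels, keeping the longest block's label and a tie flag.
import Mathlib
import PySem

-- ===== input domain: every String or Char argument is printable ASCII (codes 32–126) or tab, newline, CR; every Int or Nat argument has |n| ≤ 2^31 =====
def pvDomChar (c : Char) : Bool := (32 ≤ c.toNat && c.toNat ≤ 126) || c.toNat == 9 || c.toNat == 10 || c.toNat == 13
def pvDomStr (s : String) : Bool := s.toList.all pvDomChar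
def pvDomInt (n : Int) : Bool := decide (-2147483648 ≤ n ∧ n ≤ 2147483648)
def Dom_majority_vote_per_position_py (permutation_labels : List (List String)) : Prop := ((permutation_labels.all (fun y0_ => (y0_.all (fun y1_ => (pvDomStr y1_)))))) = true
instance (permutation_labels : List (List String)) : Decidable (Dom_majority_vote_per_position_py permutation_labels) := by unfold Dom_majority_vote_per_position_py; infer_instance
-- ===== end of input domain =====

-- B replaces A's per-position Counter + most_common() by a different algorithm:
-- it SORTS each column (UNKNOWN dropped) and scans maximal blocks of equal labels,
-- keeping the longest block and a tie flag — no count table is ever built.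
-- Objective: alternative.

-- ===== PORT A =====
def majority_vote_per_position_py (permutation_labels : List (List String)) : List String :=
  let num_positions : Int := PySem.List.len (PySem.List.pyGetD permutation_labels 0 [])
  (PySem.List.pyRange 0 num_positions 1).foldl (fun acc pos =>
    acc ++ [
      let counts := PySem.Dict.counter
        ((permutation_labels.filter
            (fun run => PySem.List.pyGetD run pos "" != "UNKNOWN")).map
          (fun run => PySem.List.pyGetD run pos ""))
      if PySem.Dict.size counts = 0 then "UNKNOWN"
      else
        let most_common := PySem.List.sorted counts.items (fun p => p.2) true
        if most_common.length = 1 ∨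
            (PySem.List.pyGetD most_common 1 ("", 0)).2 < (PySem.List.pyGetD most_common 0 ("", 0)).2
        then (PySem.List.pyGetD most_common 0 ("", 0)).1
        else "UNKNOWN"]) []

-- ===== PORT B =====
-- Source B's nested while loops: the inner while finds the current block of equal
-- labels (takeWhile/dropWhile), the outer while is this recursion over the rest.
def pvScan : List String → String → Int → Bool → String
  | [], best, _blen, tie => if tie then "UNKNOWN" else best
  | x :: xs, best, blen, tie =>
    let run_len : Int := (((x :: xs).takeWhile (fun y => y == x)).length : Int)
    let rest := (x :: xs).dropWhile (fun y => y == x)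
    if blen < run_len then pvScan rest x run_len false
    else if run_len == blen then pvScan rest best blen true
    else pvScan rest best blen tie
termination_by s => s.length
decreasing_by
  all_goals
    simp only [List.dropWhile_cons, beq_self_eq_true, if_pos, List.length_cons]
    exact Nat.lt_succ_of_le (List.length_dropWhile_le _ _)

def majority_vote_per_position_py_alt (permutation_labels : List (List String)) : List String :=
  let num_positions : Int := PySem.List.len (PySem.List.pyGetD permutation_labels 0 [])
  (PySem.List.pyRange 0 num_positions 1).foldl (fun acc pos =>
    acc ++ [
      let col := PySem.List.sorted
        ((permutation_labels.filter
            (fun run => PySem.List.pyGetD run pos "" != "UNKNOWN")).map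
          (fun run => PySem.List.pyGetD run pos "")) (fun x => x) false
      if col.length = 0 then "UNKNOWN"
      else pvScan col (col.getD 0 "") 0 false]) []

-- ===== PRECONDITION & SPEC =====
-- Pre_ excludes exactly the inputs on which A's asserts raise AssertionError:
-- the empty outer list and ragged (non-rectangular) inputs.
def Pre_majority_vote_per_position_py (permutation_labels : List (List String)) : Prop :=
  permutation_labels ≠ [] ∧
  ∀ run ∈ permutation_labels, run.length = permutation_labels.headI.length
instance (permutation_labels : List (List String)) : Decidable (Pre_majority_vote_per_position_py permutation_labels) := by unfold Pre_majority_vote_per_position_py; infer_instance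
def pvWitness_majority_vote_per_position_py : List (List String) :=
  [["RELEVANT", "UNKNOWN"], ["RELEVANT", "IRRELEVANT"]]
def Spec_majority_vote_per_position_py (permutation_labels : List (List String)) (out : List String) : Prop := out = majority_vote_per_position_py_alt permutation_labels
instance (permutation_labels : List (List String)) (out : List String) : Decidable (Spec_majority_vote_per_position_py permutation_labels out) := by unfold Spec_majority_vote_per_position_py; infer_instance

-- ===== CLAIM (what is proved, stated in full; the proofs are below) =====
def Claim_equal_majority_vote_per_position_py : Prop := ∀ (permutation_labels : List (List String)), Dom_majority_vote_per_position_py permutation_labels → Pre_majority_vote_per_position_py permutation_labels → Spec_majority_vote_per_position_py permutation_labels (majority_vote_per_position_py permutation_labels)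

-- ===== LEMMAS AND PROOFS =====

lemma pv_notmem_drop (x : String) (l : List String) (hge : ∀ y ∈ l, x ≤ y)
    (hs : l.Pairwise (· ≤ ·)) : x ∉ l.dropWhile (fun y => y == x) := by
  induction l with
  | nil => simp
  | cons a t ih =>
    by_cases hax : (a == x) = true
    · rw [List.dropWhile_cons, if_pos hax]
      exact ih (fun y hy => hge y (List.mem_cons_of_mem _ hy)) (List.pairwise_cons.mp hs).2
    · rw [List.dropWhile_cons, if_neg hax]
      have hxa : x < a := lt_of_le_of_ne (hge a List.mem_cons_self)
        (fun h => hax (by simp [h]))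
      intro hmem
      rcases List.mem_cons.mp hmem with rfl | h
      · exact absurd hxa (lt_irrefl x)
      · exact absurd (lt_of_lt_of_le hxa ((List.pairwise_cons.mp hs).1 x h)) (lt_irrefl x)

lemma pv_notmem_rest (x : String) (xs : List String) (hs : (x :: xs).Pairwise (· ≤ ·)) :
    x ∉ (x :: xs).dropWhile (fun y => y == x) :=
  pv_notmem_drop x (x :: xs)
    (fun y hy => by
      rcases List.mem_cons.mp hy with rfl | h
      · exact le_refl y
      · exact (List.pairwise_cons.mp hs).1 y h) hs

lemma pv_count_head (x : String) (xs : List String) (hs : (x :: xs).Pairwise (· ≤ ·)) :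
    (x :: xs).count x = ((x :: xs).takeWhile (fun y => y == x)).length := by
  conv_lhs => rw [← List.takeWhile_append_dropWhile (p := fun y => y == x) (l := x :: xs)]
  rw [List.count_append]
  have h1 : ((x :: xs).takeWhile (fun y => y == x)).count x
      = ((x :: xs).takeWhile (fun y => y == x)).length := by
    rw [List.count_eq_length]
    intro b hb
    have := List.mem_takeWhile_imp (p := fun y => y == x) hb
    simpa using (eq_of_beq this).symm
  rw [h1, List.count_eq_zero.2 (pv_notmem_rest x xs hs), add_zero]

lemma pv_count_other (x : String) (xs : List String) (l : String) (hl : l ≠ x) :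
    (x :: xs).count l = ((x :: xs).dropWhile (fun y => y == x)).count l := by
  conv_lhs => rw [← List.takeWhile_append_dropWhile (p := fun y => y == x) (l := x :: xs)]
  rw [List.count_append]
  have h1 : ((x :: xs).takeWhile (fun y => y == x)).count l = 0 := by
    rw [List.count_eq_zero]
    intro hmem
    exact hl (eq_of_beq (List.mem_takeWhile_imp (p := fun y => y == x) hmem))
  rw [h1, zero_add]

lemma pv_dedup_perm (x : String) (xs : List String) (hs : (x :: xs).Pairwise (· ≤ ·)) :
    (PySem.List.dedup (x :: xs)).Perm (x :: PySem.List.dedup ((x :: xs).dropWhile (fun y => y == x))) := by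
  apply (List.perm_ext_iff_of_nodup (PySem.List.nodup_dedup _) ?_).2
  · intro a
    simp only [PySem.List.mem_dedup, List.mem_cons]
    constructor
    · rintro (rfl | h)
      · exact Or.inl rfl
      · by_cases hax : a = x
        · exact Or.inl hax
        · refine Or.inr ?_
          have ha : a ∈ x :: xs := List.mem_cons_of_mem _ h
          conv at ha => rw [← List.takeWhile_append_dropWhile (p := fun y => y == x) (l := x :: xs)]
          rcases List.mem_append.mp ha with h' | h'
          · exact absurd (eq_of_beq (List.mem_takeWhile_imp (p := fun y => y == x) h')) hax
          · exact h'
    · rintro (rfl | h)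
      · exact Or.inl rfl
      · rcases List.mem_cons.mp ((List.dropWhile_sublist _).mem h) with rfl | h'
        · exact Or.inl rfl
        · exact Or.inr h'
  · exact List.nodup_cons.2 ⟨fun h => pv_notmem_rest x xs hs ((PySem.List.mem_dedup _ _).1 h),
      PySem.List.nodup_dedup _⟩

def pvMC (l : List Int) : Int := l.foldr max 0

lemma pvMC_nonneg (l : List Int) : 0 ≤ pvMC l := by
  induction l with
  | nil => simp [pvMC]
  | cons a l ih => simp only [pvMC, List.foldr_cons] at *; exact le_trans ih (le_max_right _ _)

lemma le_pvMC (l : List Int) (y : Int) (hy : y ∈ l) : y ≤ pvMC l := by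
  induction l with
  | nil => cases hy
  | cons a l ih =>
    simp only [pvMC, List.foldr_cons] at *
    rcases List.mem_cons.mp hy with h | h
    · exact h ▸ le_max_left _ _
    · exact le_trans (ih h) (le_max_right _ _)

lemma pvMC_mem_or (l : List Int) : pvMC l ∈ l ∨ pvMC l = 0 := by
  induction l with
  | nil => simp [pvMC]
  | cons a l ih =>
    simp only [pvMC, List.foldr_cons] at *
    rcases le_total a (l.foldr max 0) with h | h
    · rw [max_eq_right h]
      rcases ih with h' | h'
      · exact Or.inl (List.mem_cons_of_mem _ h')
      · exact Or.inr h'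
    · rw [max_eq_left h]; exact Or.inl List.mem_cons_self

lemma pvMC_perm {l l' : List Int} (h : l.Perm l') : pvMC l = pvMC l' := by
  induction h with
  | nil => rfl
  | cons a _ ih => simp only [pvMC, List.foldr_cons] at *; rw [ih]
  | swap a b l => simp only [pvMC, List.foldr_cons]; rw [← max_assoc, ← max_assoc, max_comm a b]
  | trans _ _ ih1 ih2 => exact ih1.trans ih2

def pvM (s : List String) (blen : Int) : Int :=
  max blen (pvMC ((PySem.List.dedup s).map (fun l => (s.count l : Int))))

def pvSpecVal (s : List String) (best : String) (blen : Int) (tie : Bool) : String :=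
  if ((PySem.List.dedup s).countP (fun l => (s.count l : Int) == pvM s blen) : Int)
      + (if blen = pvM s blen then (if tie = true then 2 else 1) else 0) = 1 then
    (if blen = pvM s blen then best
     else ((PySem.List.dedup s).filter (fun l => (s.count l : Int) == pvM s blen)).getD 0 "")
  else "UNKNOWN"

lemma pvScan_eq_spec : ∀ (n : Nat) (s : List String), s.length = n → s.Pairwise (· ≤ ·) →
    ∀ (best : String) (blen : Int) (tie : Bool), 0 ≤ blen →
    pvScan s best blen tie = pvSpecVal s best blen tie := by
  intro n
  induction n using Nat.strong_induction_on with
  | _ n ih =>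
  intro s hlen hs best blen tie hb
  cases s with
  | nil =>
    rw [show pvScan [] best blen tie = (if tie then "UNKNOWN" else best) from by simp [pvScan]]
    unfold pvSpecVal pvM
    have hd : PySem.List.dedup ([] : List String) = [] := rfl
    rw [hd]
    simp only [List.map_nil, List.countP_nil, List.filter_nil]
    have hM : max blen (pvMC []) = blen := by
      simp only [pvMC, List.foldr_nil]; exact max_eq_left hb
    cases tie <;> simp [hM]
  | cons x xs =>
    have hrs : ((x :: xs).dropWhile (fun y => y == x)).Pairwise (· ≤ ·) :=
      List.Pairwise.sublist (List.dropWhile_sublist _) hs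
    have htcons : (x :: xs).takeWhile (fun y => y == x) = x :: xs.takeWhile (fun y => y == x) := by
      rw [List.takeWhile_cons, if_pos (by simp)]
    have hsplit : ((x :: xs).takeWhile (fun y => y == x)).length
        + ((x :: xs).dropWhile (fun y => y == x)).length = n := by
      rw [← hlen, ← List.length_append, List.takeWhile_append_dropWhile]
    have hr1 : 1 ≤ (((x :: xs).takeWhile (fun y => y == x)).length : Int) := by
      rw [htcons]; simp
    have htlen1 : 1 ≤ ((x :: xs).takeWhile (fun y => y == x)).length := by
      rw [htcons]; simp
    have hrestlt : ((x :: xs).dropWhile (fun y => y == x)).length < n := by omega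
    set t := (x :: xs).takeWhile (fun y => y == x) with ht
    set rest := (x :: xs).dropWhile (fun y => y == x) with hrest
    set r : Int := (t.length : Int) with hrdef
    have hcx : ((x :: xs).count x : Int) = r := by
      rw [pv_count_head x xs hs]
    have hmapeq : (x :: PySem.List.dedup rest).map (fun l => (((x :: xs).count l : Int))) =
        r :: (PySem.List.dedup rest).map (fun l => ((rest.count l : Int))) := by
      rw [List.map_cons, hcx]
      congr 1
      apply List.map_congr_left
      intro l hl
      have hlx : l ≠ x := by
        intro e; subst e; exact pv_notmem_rest l xs hs ((PySem.List.mem_dedup _ _).1 hl)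
      exact_mod_cast pv_count_other x xs l hlx
    have hperm := pv_dedup_perm x xs hs
    have hM : pvMC ((PySem.List.dedup (x :: xs)).map (fun l => (((x :: xs).count l : Int)))) =
        max r (pvMC ((PySem.List.dedup rest).map (fun l => ((rest.count l : Int))))) := by
      rw [pvMC_perm (hperm.map _), hmapeq]; rfl
    have hpredeq : ∀ M : Int, ∀ l ∈ PySem.List.dedup rest,
        (((x :: xs).count l : Int) == M) = ((rest.count l : Int) == M) := by
      intro M l hl
      have hlx : l ≠ x := by
        intro e; subst e; exact pv_notmem_rest l xs hs ((PySem.List.mem_dedup _ _).1 hl)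
      rw [pv_count_other x xs l hlx]
    have hcP : ∀ M : Int, ((PySem.List.dedup (x :: xs)).countP (fun l => ((x :: xs).count l : Int) == M) : Int)
        = ((PySem.List.dedup rest).countP (fun l => (rest.count l : Int) == M) : Int)
          + (if r = M then 1 else 0) := by
      intro M
      rw [hperm.countP_eq, List.countP_cons]
      rw [List.countP_congr (fun l hl => by rw [hpredeq M l hl])]
      have hcx' : (((x :: xs).count x : Int) == M) = decide (r = M) := by
        rw [hcx]; by_cases h : r = M <;> simp [h]
      rw [hcx']
      by_cases h : r = M
      · rw [if_pos h, if_pos (show (decide (r = M)) = true by simp [h])]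
        push_cast
        ring
      · rw [if_neg h, if_neg (show ¬ (decide (r = M)) = true by simp [h])]
        push_cast
        ring
    have hFperm : ∀ M : Int, ((PySem.List.dedup (x :: xs)).filter (fun l => ((x :: xs).count l : Int) == M)).Perm
        ((if r = M then [x] else []) ++ (PySem.List.dedup rest).filter (fun l => (rest.count l : Int) == M)) := by
      intro M
      refine (hperm.filter _).trans ?_
      rw [List.filter_cons]
      rw [List.filter_congr (fun l hl => by rw [hpredeq M l hl])]
      have hcx' : (((x :: xs).count x : Int) == M) = decide (r = M) := by
        rw [hcx]; by_cases h : r = M <;> simp [h]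
      rw [hcx']
      by_cases h : r = M
      · rw [if_pos h, if_pos (show (decide (r = M)) = true by simp [h])]
        exact List.Perm.refl _
      · rw [if_neg h, if_neg (show ¬ (decide (r = M)) = true by simp [h]), List.nil_append]
    have pvIf_eq : ∀ (k1 k2 : Int) (v1 v2 : String), k1 = k2 → (k1 = 1 → v1 = v2) →
        ((if k1 = 1 then v1 else "UNKNOWN") = (if k2 = 1 then v2 else "UNKNOWN")) := by
      intro k1 k2 v1 v2 hk hv
      subst hk
      split_ifs with h
      · exact hv h
      · rfl
    have hgetD : ∀ (F G : List String), F.Perm G → G.length = 1 → F.getD 0 "" = G.getD 0 "" := by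
      intro F G hp hg
      obtain ⟨a, rfl⟩ := List.length_eq_one_iff.mp hg
      rw [List.perm_singleton.mp hp]
    have hscan : pvScan (x :: xs) best blen tie =
        (if blen < r then pvScan rest x r false
         else if (r == blen) = true then pvScan rest best blen true
         else pvScan rest best blen tie) := by
      rw [pvScan]
    rw [hscan]
    have IH : ∀ (b : String) (bl : Int) (ti : Bool), 0 ≤ bl →
        pvScan rest b bl ti = pvSpecVal rest b bl ti :=
      fun b bl ti hbl => ih rest.length hrestlt rest rfl hrs b bl ti hbl
    set Mr := pvMC ((PySem.List.dedup rest).map (fun l => ((rest.count l : Int)))) with hMrdef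
    have hMr0 : 0 ≤ Mr := pvMC_nonneg _
    have hcP0 : ∀ M : Int, (0:Int) ≤ ((PySem.List.dedup rest).countP (fun l => (rest.count l : Int) == M) : Int) :=
      fun M => Int.natCast_nonneg _
    have hFlen : ∀ M : Int, (((PySem.List.dedup rest).filter (fun l => (rest.count l : Int) == M)).length : Int)
        = ((PySem.List.dedup rest).countP (fun l => (rest.count l : Int) == M) : Int) := by
      intro M; rw [List.countP_eq_length_filter]
    by_cases h1 : blen < r
    · rw [if_pos h1, IH x r false (by omega)]
      have hV1 : pvM (x :: xs) blen = max r Mr := by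
        unfold pvM; rw [hM]
        exact max_eq_right (le_trans (le_of_lt h1) (le_max_left _ _))
      have hV2 : pvM rest r = max r Mr := rfl
      have hrle : r ≤ max r Mr := le_max_left _ _
      have hbm : ¬ blen = max r Mr := by omega
      unfold pvSpecVal
      rw [hV1, hV2, if_neg hbm, if_neg hbm]
      apply pvIf_eq
      · rw [hcP (max r Mr)]
        simp
      · intro hk1
        by_cases hrm : r = max r Mr
        · rw [if_pos hrm] at hk1 ⊢
          simp only [Bool.false_eq_true, if_false] at hk1
          have hcp0 : ((PySem.List.dedup rest).countP (fun l => (rest.count l : Int) == max r Mr) : Int) = 0 := by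
            omega
          have hFr : (PySem.List.dedup rest).filter (fun l => (rest.count l : Int) == max r Mr) = [] := by
            have := hFlen (max r Mr)
            rw [hcp0] at this
            exact List.length_eq_zero_iff.mp (by exact_mod_cast this)
          have hp := hFperm (max r Mr)
          rw [if_pos hrm, hFr, List.append_nil] at hp
          exact (hgetD _ _ hp rfl).symm
        · rw [if_neg hrm] at hk1 ⊢
          simp only [add_zero] at hk1
          have hcp1 : ((PySem.List.dedup rest).countP (fun l => (rest.count l : Int) == max r Mr) : Int) = 1 := by
            omega
          have hp := hFperm (max r Mr)
          rw [if_neg hrm, List.nil_append] at hp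
          refine (hgetD _ _ hp ?_).symm
          have := hFlen (max r Mr)
          omega
    · by_cases h2 : (r == blen) = true
      · rw [if_neg h1, if_pos h2, IH best blen true hb]
        have hrb : r = blen := by simpa using h2
        have hV1 : pvM (x :: xs) blen = max blen Mr := by
          unfold pvM; rw [hM, hrb, ← max_assoc, max_self]
        have hV2 : pvM rest blen = max blen Mr := rfl
        unfold pvSpecVal
        rw [hV1, hV2]
        by_cases hbV : blen = max blen Mr
        · have hkR : ¬ ((PySem.List.dedup rest).countP (fun l => (rest.count l : Int) == max blen Mr) : Int) + (if blen = max blen Mr then (if (true : Bool) = true then (2:Int) else 1) else 0) = 1 := by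
            rw [if_pos hbV]
            have h5 : (if (true : Bool) = true then (2:Int) else 1) = 2 := rfl
            have := hcP0 (max blen Mr)
            omega
          have hkS : ¬ ((PySem.List.dedup (x :: xs)).countP (fun l => ((x :: xs).count l : Int) == max blen Mr) : Int) + (if blen = max blen Mr then (if tie = true then (2:Int) else 1) else 0) = 1 := by
            rw [if_pos hbV, hcP (max blen Mr), if_pos (by omega : r = max blen Mr)]
            have h5 : (1:Int) ≤ (if tie = true then (2:Int) else 1) := by
              cases tie <;> norm_num
            have := hcP0 (max blen Mr)
            omega
          rw [if_neg hkR, if_neg hkS]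
        · rw [if_neg hbV, if_neg hbV]
          have hrm : ¬ r = max blen Mr := by omega
          apply pvIf_eq
          · rw [hcP (max blen Mr), if_neg hrm, if_neg hbV]
            ring
          · intro hk1
            rw [if_neg hbV]
            have hp := hFperm (max blen Mr)
            rw [if_neg hrm, List.nil_append] at hp
            refine (hgetD _ _ hp ?_).symm
            have := hFlen (max blen Mr)
            omega
      · rw [if_neg h1, if_neg h2, IH best blen tie hb]
        have hrb : r < blen := by
          have : ¬ r = blen := by simpa using h2
          omega
        have hV1 : pvM (x :: xs) blen = max blen Mr := by
          unfold pvM; rw [hM, ← max_assoc, max_eq_left (le_of_lt hrb)]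
        have hV2 : pvM rest blen = max blen Mr := rfl
        unfold pvSpecVal
        rw [hV1, hV2]
        have hrm : ¬ r = max blen Mr := by
          have := le_max_left blen Mr; omega
        apply pvIf_eq
        · rw [hcP (max blen Mr), if_neg hrm]
          ring
        · intro hk1
          by_cases hbV : blen = max blen Mr
          · rw [if_pos hbV, if_pos hbV]
          · rw [if_neg hbV, if_neg hbV]
            rw [if_neg hbV] at hk1
            have hp := hFperm (max blen Mr)
            rw [if_neg hrm, List.nil_append] at hp
            refine (hgetD _ _ hp ?_).symm
            have := hFlen (max blen Mr)
            omega

lemma pv_winner (ls : List (String × Int)) (p0 : String × Int) (hmem : p0 ∈ ls)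
    (hl : ((ls.filter (fun p => p.2 == p0.2)).map (fun p => p.1)).length = 1) :
    ((ls.filter (fun p => p.2 == p0.2)).map (fun p => p.1)).getD 0 "" = p0.1 := by
  rw [List.length_map] at hl
  obtain ⟨x, hx⟩ := List.length_eq_one_iff.mp hl
  have hp0 : p0 ∈ ls.filter (fun p => p.2 == p0.2) := List.mem_filter.mpr ⟨hmem, by simp⟩
  rw [hx] at hp0 ⊢
  simp_all

lemma pv_decision (ls : List (String × Int)) (hne : ls ≠ []) :
    (let most_common := PySem.List.sorted ls (fun p => p.2) true
     if most_common.length = 1 ∨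
         (PySem.List.pyGetD most_common 1 ("", 0)).2 < (PySem.List.pyGetD most_common 0 ("", 0)).2
     then (PySem.List.pyGetD most_common 0 ("", 0)).1
     else "UNKNOWN")
    = (let m := (PySem.List.max? (ls.map (fun p => p.2)) (fun v => v)).getD 0
       let winners := (ls.filter (fun p => p.2 == m)).map (fun p => p.1)
       if winners.length = 1 then winners.getD 0 "" else "UNKNOWN") := by
  rcases hmc : PySem.List.sorted ls (fun p => p.2) true with _ | ⟨p0, t⟩
  · exact absurd ((PySem.List.sorted_eq_nil_iff ls _ true).mp hmc) hne
  rcases hmax : PySem.List.max? (ls.map (fun p => p.2)) (fun v => v) with _ | m'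
  · rw [PySem.List.max?_eq_none_iff] at hmax
    exact absurd (List.map_eq_nil_iff.mp hmax) hne
  simp only [hmax, Option.getD_some]
  have hp0mem : p0 ∈ ls := (PySem.List.mem_sorted ls _ true p0).mp (hmc ▸ List.mem_cons_self)
  have hm : m' = p0.2 := by
    obtain ⟨y, hy, hy2⟩ := List.mem_map.mp (PySem.List.max?_mem hmax)
    exact le_antisymm (hy2 ▸ PySem.List.key_head_sorted_rev_ge ls _ hmc y hy)
      (PySem.List.max?_isMax hmax _ (List.mem_map_of_mem hp0mem))
  subst hm
  have hwl : ((ls.filter (fun p => p.2 == p0.2)).map (fun p => p.1)).length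
      = t.countP (fun p => p.2 == p0.2) + 1 := by
    rw [List.length_map, ← List.countP_eq_length_filter,
      ← (PySem.List.sorted_perm ls (fun p => p.2) true).countP_eq, hmc]
    simp
  cases t with
  | nil =>
    have hc : ([p0] : List (String × Int)).length = 1 ∨
        (PySem.List.pyGetD [p0] 1 ("", 0)).2 < (PySem.List.pyGetD [p0] 0 ("", 0)).2 :=
      Or.inl rfl
    rw [if_pos hc, if_pos (by simpa using hwl), PySem.List.pyGetD_zero_cons]
    exact (pv_winner ls p0 hp0mem (by simpa using hwl)).symm
  | cons p1 t' =>
    have hp1mem : p1 ∈ ls := (PySem.List.mem_sorted ls _ true p1).mp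
      (hmc ▸ List.mem_cons_of_mem _ List.mem_cons_self)
    have hp1le : p1.2 ≤ p0.2 := PySem.List.key_head_sorted_rev_ge ls _ hmc p1 hp1mem
    rw [PySem.List.pyGetD_zero_cons, PySem.List.pyGetD_ofNat']
    simp only [List.getD_cons_succ, List.getD_cons_zero]
    by_cases hlt : p1.2 < p0.2
    · have hcnt : (p1 :: t').countP (fun p => p.2 == p0.2) = 0 := by
        have hpw := PySem.List.sorted_pairwise_rev ls (fun p => p.2)
        rw [hmc] at hpw
        have ht' := (List.pairwise_cons.mp (List.pairwise_cons.mp hpw).2).1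
        rw [List.countP_eq_zero]
        intro y hy
        rcases List.mem_cons.mp hy with h | h
        · subst h; simp [Int.ne_of_lt hlt]
        · have : y.2 < p0.2 := lt_of_le_of_lt (ht' y h) hlt
          simp [Int.ne_of_lt this]
      rw [if_pos (show (p0 :: p1 :: t').length = 1 ∨ p1.2 < p0.2 from Or.inr hlt),
        if_pos (by rw [hwl, hcnt]),
        (pv_winner ls p0 hp0mem (by rw [hwl, hcnt])).symm]
    · have hp1eq : p1.2 = p0.2 := le_antisymm hp1le (not_lt.mp hlt)
      rw [if_neg, if_neg]
      · rw [hwl, List.countP_cons]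
        simp [hp1eq]
      · rintro (h1 | h2)
        · simp at h1
        · exact hlt h2

lemma pv_getD_perm1 (F G : List String) (hp : F.Perm G) (hg : G.length = 1) :
    F.getD 0 "" = G.getD 0 "" := by
  obtain ⟨a, rfl⟩ := List.length_eq_one_iff.mp hg
  rw [List.perm_singleton.mp hp]

lemma pv_branch (col : List String) :
    (let counts := PySem.Dict.counter col
     if PySem.Dict.size counts = 0 then "UNKNOWN"
     else
       let most_common := PySem.List.sorted counts.items (fun p => p.2) true
       if most_common.length = 1 ∨
           (PySem.List.pyGetD most_common 1 ("", 0)).2 < (PySem.List.pyGetD most_common 0 ("", 0)).2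
       then (PySem.List.pyGetD most_common 0 ("", 0)).1
       else "UNKNOWN")
    = (let s := PySem.List.sorted col (fun x => x) false
       if s.length = 0 then "UNKNOWN" else pvScan s (s.getD 0 "") 0 false) := by
  rcases hcol : col with _ | ⟨c0, ct⟩
  · rfl
  rw [← hcol]
  have hcolne : col ≠ [] := by rw [hcol]; exact List.cons_ne_nil _ _
  -- A side: items of the counter
  have hitems : (PySem.Dict.counter col).items
      = (PySem.List.dedup col).map (fun k => (k, (col.count k : Int))) := by
    rw [PySem.Dict.items_counter, PySem.List.dedup_eq_ofList]
  have hdedne : PySem.List.dedup col ≠ [] := by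
    intro h
    have : c0 ∈ PySem.List.dedup col := (PySem.List.mem_dedup _ _).2 (by rw [hcol]; exact List.mem_cons_self)
    rw [h] at this
    exact absurd this (List.not_mem_nil)
  have hitemsne : (PySem.Dict.counter col).items ≠ [] := by
    rw [hitems]
    intro h
    exact hdedne (List.map_eq_nil_iff.mp h)
  have hsizene : ¬ PySem.Dict.size (PySem.Dict.counter col) = 0 := by
    show ¬ (PySem.Dict.counter col).items.length = 0
    intro h
    exact hitemsne (List.length_eq_zero_iff.mp h)
  -- B side: the sorted column
  have hsne : PySem.List.sorted col (fun x => x) false ≠ [] := by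
    intro h
    exact hcolne ((PySem.List.sorted_eq_nil_iff col _ false).mp h)
  have hslen : ¬ (PySem.List.sorted col (fun x => x) false).length = 0 := by
    intro h
    exact hsne (List.length_eq_zero_iff.mp h)
  simp only [if_neg hsizene, if_neg hslen]
  rw [pv_decision _ hitemsne]
  rw [pvScan_eq_spec (PySem.List.sorted col (fun x => x) false).length _ rfl
    (PySem.List.sorted_pairwise col (fun x => x)) _ 0 false (le_refl 0)]
  -- now both sides are closed forms; identify them
  set s := PySem.List.sorted col (fun x => x) false with hsdef
  have hcnt : ∀ l, s.count l = col.count l :=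
    fun l => (PySem.List.sorted_perm col (fun x => x) false).count_eq l
  have hpermD : (PySem.List.dedup s).Perm (PySem.List.dedup col) := by
    apply (List.perm_ext_iff_of_nodup (PySem.List.nodup_dedup _) (PySem.List.nodup_dedup _)).2
    intro a
    rw [PySem.List.mem_dedup, PySem.List.mem_dedup]
    exact (PySem.List.sorted_perm col (fun x => x) false).mem_iff
  have hfseq : (PySem.List.dedup s).map (fun l => (s.count l : Int))
      = (PySem.List.dedup s).map (fun l => (col.count l : Int)) :=
    List.map_congr_left (fun l _ => by rw [hcnt l])
  have hmapperm : ((PySem.List.dedup s).map (fun l => (s.count l : Int))).Perm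
      ((PySem.List.dedup col).map (fun l => (col.count l : Int))) := by
    rw [hfseq]
    exact hpermD.map _
  have hMC : pvMC ((PySem.List.dedup s).map (fun l => (s.count l : Int)))
      = pvMC ((PySem.List.dedup col).map (fun l => (col.count l : Int))) := pvMC_perm hmapperm
  -- counts are at least 1
  have hge1 : ∀ y ∈ (PySem.List.dedup col).map (fun l => (col.count l : Int)), 1 ≤ y := by
    intro y hy
    obtain ⟨l, hl, rfl⟩ := List.mem_map.mp hy
    have : l ∈ col := (PySem.List.mem_dedup _ _).1 hl
    have := List.count_pos_iff.2 this
    omega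
  -- the max? on the A side equals pvMC
  have hmaxsome : ∀ m', PySem.List.max? ((PySem.List.dedup col).map (fun l => (col.count l : Int))) (fun v => v) = some m' →
      m' = pvMC ((PySem.List.dedup col).map (fun l => (col.count l : Int))) := by
    intro m' hmax
    have hmem := PySem.List.max?_mem hmax
    have h1 : m' ≤ pvMC _ := le_pvMC _ _ hmem
    rcases pvMC_mem_or ((PySem.List.dedup col).map (fun l => (col.count l : Int))) with h | h
    · exact le_antisymm h1 (PySem.List.max?_isMax hmax _ h)
    · have := hge1 m' hmem
      omega
  rcases hmax : PySem.List.max? ((PySem.List.dedup col).map (fun l => (col.count l : Int))) (fun v => v) with _ | m'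
  · rw [PySem.List.max?_eq_none_iff] at hmax
    exact absurd (List.map_eq_nil_iff.mp hmax) hdedne
  have hm' := hmaxsome m' hmax
  -- name the common maximum
  set MC := pvMC ((PySem.List.dedup col).map (fun l => (col.count l : Int))) with hMCdef
  have hMC1 : 1 ≤ MC := by
    have hc0 : ((col.count c0 : Int)) ∈ (PySem.List.dedup col).map (fun l => (col.count l : Int)) :=
      List.mem_map_of_mem ((PySem.List.mem_dedup _ _).2 (by rw [hcol]; exact List.mem_cons_self))
    exact le_trans (hge1 _ hc0) (le_pvMC _ _ hc0)
  simp only [hitems]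
  have hls2 : (((PySem.List.dedup col).map (fun k => (k, (col.count k : Int)))).map (fun p => p.2))
      = (PySem.List.dedup col).map (fun l => (col.count l : Int)) := by
    simp [List.map_map, Function.comp_def]
  rw [hls2, hmax]
  simp only [Option.getD_some, hm']
  have hwinners : ((((PySem.List.dedup col).map (fun k => (k, (col.count k : Int)))).filter
      (fun p => p.2 == MC)).map (fun p => p.1))
      = (PySem.List.dedup col).filter (fun l => (col.count l : Int) == MC) := by
    rw [List.filter_map, List.map_map]
    simp [Function.comp_def]
  rw [hwinners]
  -- B side
  unfold pvSpecVal
  have hpvM : pvM s 0 = MC := by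
    unfold pvM
    rw [hMC]
    exact max_eq_right (by omega)
  have h0 : ¬ (0:Int) = MC := by omega
  rw [hpvM, if_neg h0, if_neg h0, add_zero]
  have hcntP : (PySem.List.dedup s).countP (fun l => (s.count l : Int) == MC)
      = (PySem.List.dedup col).countP (fun l => (col.count l : Int) == MC) := by
    rw [List.countP_congr (fun l _ => by rw [hcnt l]), hpermD.countP_eq]
  have hFperm : ((PySem.List.dedup s).filter (fun l => (s.count l : Int) == MC)).Perm
      ((PySem.List.dedup col).filter (fun l => (col.count l : Int) == MC)) := by
    rw [List.filter_congr (fun l _ => by rw [hcnt l])]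
    exact hpermD.filter _
  by_cases hk : (PySem.List.dedup col).countP (fun l => (col.count l : Int) == MC) = 1
  · rw [if_pos (by rw [← List.countP_eq_length_filter]; exact hk),
      if_pos (by rw [hcntP]; exact_mod_cast congrArg (Nat.cast : Nat → Int) hk)]
    exact (pv_getD_perm1 _ _ hFperm (by rw [← List.countP_eq_length_filter]; exact hk)).symm
  · rw [if_neg (by rw [← List.countP_eq_length_filter]; exact hk),
      if_neg (by rw [hcntP]; exact_mod_cast fun h => hk (by exact_mod_cast h))]

-- ===== VERDICT (by name: the statement is the Claim_ definition above) =====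
theorem majority_vote_per_position_py_spec : Claim_equal_majority_vote_per_position_py := by
  intro pl _hdom _hpre
  unfold Spec_majority_vote_per_position_py majority_vote_per_position_py
    majority_vote_per_position_py_alt
  rw [PySem.List.foldl_append_singleton_eq_map, List.nil_append]
  rw [PySem.List.foldl_append_singleton_eq_map, List.nil_append]
  apply List.map_congr_left
  intro pos _
  exact pv_branch _
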